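-- pv_equiv track=rewrite | github.com/alvfig/b3futurecontracts | b3futurecontracts.py | increment_month
-- ===== SOURCE A (Python) =====
-- def increment_month(year, month, increment=1):
--     '''Increments month by increment and returns the resulting year and month'''
--     if not all((isinstance(x, int) for x in (year, month, increment))):
--         raise TypeError('year, month and increment must be integers')
--     if not 1 <= month <= 12:
--         raise ValueError('invalid month {}'.format(month))
--     month += increment
--     while 12 < month:
--         month -= 12
--         year += 1
--     return year, month
-- ===== SOURCE B (Python) =====
-- def increment_month(year, month, increment=1):
--     '''Increments month by increment and returns the resulting year and month'''
--     if not all(isinstance(x, int) for x in (year, month, increment)):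
--         raise TypeError('year, month and increment must be integers')
--     if not 1 <= month <= 12:
--         raise ValueError('invalid month {}'.format(month))
--     month += increment
--     if month > 12:
--         carry, rem = divmod(month - 1, 12)
--         year += carry
--         month = rem + 1
--     return year, month
-- ===== Notes on version B (the rewrite author's own statement) =====
-- stated objective: simpler
-- what changed: Replaces A's repeated-subtraction while loop with a single closed-form divmod carry (guarded by month > 12, which is exactly when A's loop runs), so the carry is O(1) instead of O(increment/12).
import Mathlib
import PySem

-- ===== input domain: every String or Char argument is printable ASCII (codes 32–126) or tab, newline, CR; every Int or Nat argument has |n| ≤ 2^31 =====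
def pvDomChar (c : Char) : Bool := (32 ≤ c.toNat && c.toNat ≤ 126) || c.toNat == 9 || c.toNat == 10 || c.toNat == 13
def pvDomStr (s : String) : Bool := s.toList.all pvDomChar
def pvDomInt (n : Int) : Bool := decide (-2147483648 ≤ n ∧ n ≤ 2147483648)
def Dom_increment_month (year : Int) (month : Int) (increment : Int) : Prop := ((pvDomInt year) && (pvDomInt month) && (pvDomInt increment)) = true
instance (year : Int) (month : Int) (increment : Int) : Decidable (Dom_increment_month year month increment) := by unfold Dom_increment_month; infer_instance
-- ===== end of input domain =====

-- B replaces A's while-loop month carry by one closed-form divmod step (simpler, O(1)).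
-- Pre_ excludes inputs with month outside 1..12, on which A raises ValueError.


-- ===== PORT A =====
-- the 'while 12 < month' loop of A, step for step
def incLoopA (year : Int) (month : Int) : Int × Int :=
  if 12 < month then incLoopA (year + 1) (month - 12)
  else (year, month)
termination_by month.toNat
decreasing_by
  have h : 12 < month := by assumption
  omega

def increment_month (year : Int) (month : Int) (increment : Int) : Int × Int :=
  incLoopA year (month + increment)

-- ===== PORT B =====
def increment_month_alt (year : Int) (month : Int) (increment : Int) : Int × Int :=
  let m := month + increment
  if m > 12 then
    (year + PySem.Int.floordiv (m - 1) 12, PySem.Int.mod (m - 1) 12 + 1)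
  else (year, m)

-- ===== PRECONDITION & SPEC =====
-- exactly the inputs where A returns: month in 1..12 (otherwise A raises ValueError)
def Pre_increment_month (year : Int) (month : Int) (increment : Int) : Prop :=
  1 ≤ month ∧ month ≤ 12
instance (year : Int) (month : Int) (increment : Int) : Decidable (Pre_increment_month year month increment) := by unfold Pre_increment_month; infer_instance

def pvWitness_increment_month : Int × Int × Int := (2020, 5, 9)

def Spec_increment_month (year : Int) (month : Int) (increment : Int) (out : Int × Int) : Prop := out = increment_month_alt year month increment
instance (year : Int) (month : Int) (increment : Int) (out : Int × Int) : Decidable (Spec_increment_month year month increment out) := by unfold Spec_increment_month; infer_instance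

-- ===== CLAIM =====
def Claim_equal_increment_month : Prop := ∀ (year : Int) (month : Int) (increment : Int), Dom_increment_month year month increment → Pre_increment_month year month increment → Spec_increment_month year month increment (increment_month year month increment)

-- ===== LEMMAS AND PROOFS =====
-- A's loop in closed form
theorem incLoopA_closed (year month : Int) :
    incLoopA year month =
      if 12 < month then (year + PySem.Int.floordiv (month - 1) 12, PySem.Int.mod (month - 1) 12 + 1)
      else (year, month) := by
  by_cases h : 12 < month
  · rw [incLoopA]
    simp only [if_pos h]
    rw [incLoopA_closed (year + 1) (month - 12)]
    by_cases h2 : 12 < month - 12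
    · simp only [if_pos h2]
      have hd : PySem.Int.floordiv (month - 12 - 1) 12 = PySem.Int.floordiv (month - 1) 12 - 1 := by
        have := PySem.Int.floordiv_eq_ediv_of_pos (a := month - 12 - 1) (b := 12) (by norm_num)
        have := PySem.Int.floordiv_eq_ediv_of_pos (a := month - 1) (b := 12) (by norm_num)
        omega
      have hm : PySem.Int.mod (month - 12 - 1) 12 = PySem.Int.mod (month - 1) 12 := by
        have := PySem.Int.mod_eq_emod_of_pos (a := month - 12 - 1) (b := 12) (by norm_num)
        have := PySem.Int.mod_eq_emod_of_pos (a := month - 1) (b := 12) (by norm_num)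
        omega
      rw [hd, hm]
      simp only [Prod.mk.injEq, and_true]
      ring
    · simp only [if_neg h2]
      have h3 : 1 ≤ month - 12 ∧ month - 12 ≤ 12 := by omega
      have hd : PySem.Int.floordiv (month - 1) 12 = 1 := by
        have := PySem.Int.floordiv_eq_ediv_of_pos (a := month - 1) (b := 12) (by norm_num)
        omega
      have hm : PySem.Int.mod (month - 1) 12 = month - 13 := by
        have := PySem.Int.mod_eq_emod_of_pos (a := month - 1) (b := 12) (by norm_num)
        omega
      rw [hd, hm]
      simp only [Prod.mk.injEq, true_and]
      omega
  · rw [incLoopA]; simp [h]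
termination_by month.toNat
decreasing_by omega

-- ===== VERDICT =====
theorem increment_month_spec : Claim_equal_increment_month := by
  intro year month increment _ _
  unfold Spec_increment_month increment_month increment_month_alt
  simp only [incLoopA_closed]
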